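-- pv_equiv track=rewrite | github.com/nsekhon1991/pysplit | hysplit.v5/python/hysplitplot/hysplitplot/conc/cntr.py | _separate_paths
-- ===== SOURCE A (Python) =====
-- import copy
--
-- def _separate_paths(seg, path_codes, separator_code):
--     head = [k for k, c in enumerate(path_codes) if c == separator_code]
--
--     tail = copy.deepcopy(head)
--     tail.append(len(path_codes))
--     tail.pop(0)
--
--     paths = []
--     for h, t in zip(head, tail):
--         paths.append(seg[h:t])
--
--     return paths
-- ===== SOURCE B (Python) =====
-- def _separate_paths(seg, path_codes, separator_code):
--     paths = []
--     start = None
--     for k, c in enumerate(path_codes):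
--         if c == separator_code:
--             if start is not None:
--                 paths.append(seg[start:k])
--             start = k
--     if start is not None:
--         paths.append(seg[start:len(path_codes)])
--     return paths
-- ===== Notes on version B (the rewrite author's own statement) =====
-- stated objective: simpler
-- what changed: One pass with a running start index that emits seg[start:k] slices on the fly, instead of building head/tail boundary index lists (with a deepcopy) and zipping them.
import Mathlib
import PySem

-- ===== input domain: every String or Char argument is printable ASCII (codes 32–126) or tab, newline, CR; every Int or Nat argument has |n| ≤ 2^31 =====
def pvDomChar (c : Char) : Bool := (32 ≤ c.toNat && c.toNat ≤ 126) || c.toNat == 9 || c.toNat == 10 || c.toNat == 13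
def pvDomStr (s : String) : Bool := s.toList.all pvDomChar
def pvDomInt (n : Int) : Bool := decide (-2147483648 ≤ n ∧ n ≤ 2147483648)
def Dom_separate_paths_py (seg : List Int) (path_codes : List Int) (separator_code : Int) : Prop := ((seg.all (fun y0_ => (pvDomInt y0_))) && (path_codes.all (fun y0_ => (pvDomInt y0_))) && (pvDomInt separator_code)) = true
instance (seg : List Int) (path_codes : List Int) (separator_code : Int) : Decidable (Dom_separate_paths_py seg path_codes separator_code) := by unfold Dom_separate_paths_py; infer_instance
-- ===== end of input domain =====

-- B replaces A's head/tail boundary-index lists (and the deepcopy) by one pass that emits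
-- seg[start:k] slices on the fly; objective: simpler (same cost).

-- ===== PORT A =====
def separate_paths_py (seg : List Int) (path_codes : List Int) (separator_code : Int) : List (List Int) :=
  -- head = [k for k, c in enumerate(path_codes) if c == separator_code]
  let head : List Int :=
    ((PySem.List.enumerate path_codes 0).filter (fun kc => kc.2 == separator_code)).map (fun kc => kc.1)
  -- tail = deepcopy(head); tail.append(len(path_codes)); tail.pop(0)
  let tail : List Int := (head ++ [(path_codes.length : Int)]).tail
  -- paths = []; for h, t in zip(head, tail): paths.append(seg[h:t])
  (head.zip tail).foldl (fun paths ht => paths ++ [PySem.List.slice seg (some ht.1) (some ht.2)]) []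

-- ===== PORT B =====
def separate_paths_py_alt (seg : List Int) (path_codes : List Int) (separator_code : Int) : List (List Int) :=
  -- paths = []; start = None; for k, c in enumerate(path_codes): …
  let st : List (List Int) × Option Int :=
    (PySem.List.enumerate path_codes 0).foldl
      (fun (acc : List (List Int) × Option Int) kc =>
        if kc.2 == separator_code then
          (match acc.2 with
           | some s => acc.1 ++ [PySem.List.slice seg (some s) (some kc.1)]
           | none => acc.1,
           some kc.1)
        else acc)
      ([], none)
  -- if start is not None: paths.append(seg[start:len(path_codes)])
  match st.2 with
  | some s => st.1 ++ [PySem.List.slice seg (some s) (some (path_codes.length : Int))]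
  | none => st.1

-- ===== PRECONDITION & SPEC =====
def Spec_separate_paths_py (seg : List Int) (path_codes : List Int) (separator_code : Int) (out : List (List Int)) : Prop := out = separate_paths_py_alt seg path_codes separator_code
instance (seg : List Int) (path_codes : List Int) (separator_code : Int) (out : List (List Int)) : Decidable (Spec_separate_paths_py seg path_codes separator_code out) := by unfold Spec_separate_paths_py; infer_instance

-- ===== CLAIM (what is proved, stated in full; the proofs are below) =====
def Claim_equal_separate_paths_py : Prop := ∀ (seg : List Int) (path_codes : List Int) (separator_code : Int), Dom_separate_paths_py seg path_codes separator_code → Spec_separate_paths_py seg path_codes separator_code (separate_paths_py seg path_codes separator_code)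

-- ===== LEMMAS AND PROOFS =====

-- the common value: for separator positions hs, slices seg[h : next separator (or n)]
def pvZ (seg : List Int) (n : Int) : List Int → List (List Int)
  | [] => []
  | h :: t => PySem.List.slice seg (some h) (some (t.headD n)) :: pvZ seg n t

-- B's loop body restricted to the separator positions only
def pvG (seg : List Int) : List Int → List (List Int) × Option Int → List (List Int) × Option Int
  | [], st => st
  | h :: t, (acc, some s) => pvG seg t (acc ++ [PySem.List.slice seg (some s) (some h)], some h)
  | h :: t, (acc, none) => pvG seg t (acc, some h)

def pvFinish (seg : List Int) (n : Int) : List (List Int) × Option Int → List (List Int)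
  | (acc, some s) => acc ++ [PySem.List.slice seg (some s) (some n)]
  | (acc, none) => acc

-- B's fold over all of enumerate equals pvG over just the separator positions
theorem pvFold_eq_pvG (seg : List Int) (sep : Int) (ps : List (Int × Int)) (st : List (List Int) × Option Int) :
    ps.foldl
      (fun (acc : List (List Int) × Option Int) kc =>
        if kc.2 == sep then
          (match acc.2 with
           | some s => acc.1 ++ [PySem.List.slice seg (some s) (some kc.1)]
           | none => acc.1,
           some kc.1)
        else acc) st
    = pvG seg ((ps.filter (fun kc => kc.2 == sep)).map (fun kc => kc.1)) st := by
  induction ps generalizing st with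
  | nil => simp [pvG]
  | cons p t ih =>
    rw [List.foldl_cons, List.filter_cons]
    by_cases h : (p.2 == sep) = true
    · obtain ⟨acc, s?⟩ := st
      cases s? <;>
        · simp only [h, if_true, List.map_cons]
          rw [ih]
          simp [pvG]
    · rw [if_neg h, if_neg h, ih]

theorem pvG_finish (seg : List Int) (n : Int) (hs : List Int) (acc : List (List Int)) :
    (∀ s, pvFinish seg n (pvG seg hs (acc, some s))
        = acc ++ PySem.List.slice seg (some s) (some (hs.headD n)) :: pvZ seg n hs)
    ∧ pvFinish seg n (pvG seg hs (acc, none)) = acc ++ pvZ seg n hs := by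
  induction hs generalizing acc with
  | nil => simp [pvG, pvFinish, pvZ]
  | cons h t ih =>
    constructor
    · intro s
      have := (ih (acc ++ [PySem.List.slice seg (some s) (some h)])).1 h
      simp [pvG, this, pvZ]
    · have := (ih acc).1 h
      simp [pvG, this, pvZ]

-- A's accumulating foldl is a map over the zip
theorem pvFoldl_append_map (f : Int × Int → List Int) (l : List (Int × Int)) (acc : List (List Int)) :
    l.foldl (fun paths ht => paths ++ [f ht]) acc = acc ++ l.map f := by
  induction l generalizing acc with
  | nil => simp
  | cons x t ih => simp [List.foldl_cons, ih]

-- A's zip-of-head-and-tail construction equals pvZ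
theorem pvZip_eq_pvZ (seg : List Int) (n : Int) (hs : List Int) :
    ((hs.zip ((hs ++ [n]).tail)).map
      (fun ht => PySem.List.slice seg (some ht.1) (some ht.2))) = pvZ seg n hs := by
  induction hs with
  | nil => simp [pvZ]
  | cons h t ih =>
    cases t with
    | nil => simp [pvZ]
    | cons h2 t2 => simpa [pvZ] using ih

-- ===== VERDICT (by name: the statement is the Claim_ definition above) =====
theorem separate_paths_py_spec : Claim_equal_separate_paths_py := by
  intro seg path_codes sep _
  show separate_paths_py seg path_codes sep = separate_paths_py_alt seg path_codes sep
  unfold separate_paths_py separate_paths_py_alt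
  rw [pvFold_eq_pvG]
  rw [pvFoldl_append_map, pvZip_eq_pvZ]
  set hs := ((PySem.List.enumerate path_codes 0).filter (fun kc => kc.2 == sep)).map (fun kc => kc.1)
  have h := pvG_finish seg (path_codes.length : Int) hs []
  have h2 := h.2
  cases hg : pvG seg hs ([], none) with
  | mk acc s? =>
    cases s? with
    | none => simpa [pvFinish, hg] using h2.symm
    | some s => simpa [pvFinish, hg] using h2.symm
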